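-- pv_equiv track=rewrite | github.com/sla2yer/fruity_quantum_flyway_brain_simulator | src/flywire_wave/dashboard_scene_circuit.py | _normalize_context_interaction_flow_catalog
-- ===== SOURCE A (Python) =====
-- from collections.abc import Mapping, Sequence
-- from typing import Any
--
-- def _normalize_context_interaction_flow_catalog(payload: Any) -> list[dict[str, Any]]:
--     if not isinstance(payload, Sequence):
--         return []
--     result: list[dict[str, Any]] = []
--     for item in payload:
--         if not isinstance(item, Mapping):
--             continue
--         result.append(
--             {
--                 "interaction_flow_id": str(item.get("interaction_flow_id") or ""),
--                 "display_name": str(item.get("display_name") or ""),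
--                 "flow_kind": str(item.get("flow_kind") or ""),
--                 "graph_view_id": str(item.get("graph_view_id") or ""),
--                 "query_profile_id": str(item.get("query_profile_id") or ""),
--                 "overlay_id": (
--                     None if item.get("overlay_id") is None else str(item.get("overlay_id"))
--                 ),
--                 "metadata_facet_id": (
--                     None
--                     if item.get("metadata_facet_id") is None
--                     else str(item.get("metadata_facet_id"))
--                 ),
--                 "pathway_explanation_mode_id": (
--                     None
--                     if item.get("pathway_explanation_mode_id") is None
--                     else str(item.get("pathway_explanation_mode_id"))
--                 ),
--                 "availability": str(item.get("availability") or "unavailable"),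
--                 "default_target_id": (
--                     None
--                     if item.get("default_target_id") is None
--                     else str(item.get("default_target_id"))
--                 ),
--                 "caption": str(item.get("caption") or ""),
--             }
--         )
--     return result
-- ===== SOURCE B (Python) =====
-- from collections.abc import Mapping, Sequence
-- from typing import Any
--
-- # Ordered field spec: (key, default). default None means "nullable" (keep None,
-- # otherwise str()); a string default means str(value or default).
-- _FLOW_FIELD_SPECS = [
--     ("interaction_flow_id", ""),
--     ("display_name", ""),
--     ("flow_kind", ""),
--     ("graph_view_id", ""),
--     ("query_profile_id", ""),
--     ("overlay_id", None),
--     ("metadata_facet_id", None),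
--     ("pathway_explanation_mode_id", None),
--     ("availability", "unavailable"),
--     ("default_target_id", None),
--     ("caption", ""),
-- ]
--
-- def _normalize_context_interaction_flow_catalog(payload: Any) -> list[dict[str, Any]]:
--     # Column-major strategy: first keep the Mapping items, then build ONE COLUMN
--     # per field (the coerced values of that field across all items), and finally
--     # transpose the columns back into per-item dicts with zip(*columns).
--     if not isinstance(payload, Sequence):
--         return []
--     items = [item for item in payload if isinstance(item, Mapping)]
--     columns = []
--     for key, default in _FLOW_FIELD_SPECS:
--         if default is None:
--             columns.append(
--                 [None if item.get(key) is None else str(item.get(key)) for item in items]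
--             )
--         else:
--             columns.append([str(item.get(key) or default) for item in items])
--     keys = [key for key, _ in _FLOW_FIELD_SPECS]
--     return [dict(zip(keys, row)) for row in zip(*columns)]
-- ===== Notes on version B (the rewrite author's own statement) =====
-- stated objective: alternative
-- what changed: Replaces A's row-major loop (one literal dict appended per item) with a column-major build: one coerced column per field across all items, driven by an ordered (key, default) spec table, then zip(*columns) transposes the columns back into per-item dicts.
import Mathlib
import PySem

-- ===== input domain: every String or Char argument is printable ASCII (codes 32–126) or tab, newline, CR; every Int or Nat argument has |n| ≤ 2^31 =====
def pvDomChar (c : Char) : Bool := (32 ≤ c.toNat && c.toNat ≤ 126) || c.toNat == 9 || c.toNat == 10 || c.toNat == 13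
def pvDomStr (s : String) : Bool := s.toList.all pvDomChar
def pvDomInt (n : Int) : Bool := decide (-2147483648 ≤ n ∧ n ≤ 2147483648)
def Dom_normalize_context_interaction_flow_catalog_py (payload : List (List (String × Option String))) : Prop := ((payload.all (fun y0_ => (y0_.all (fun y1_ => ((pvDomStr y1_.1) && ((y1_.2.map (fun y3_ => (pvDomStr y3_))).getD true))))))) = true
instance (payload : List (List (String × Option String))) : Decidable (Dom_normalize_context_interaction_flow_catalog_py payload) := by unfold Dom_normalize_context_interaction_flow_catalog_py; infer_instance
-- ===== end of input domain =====

-- B builds the result column-major: one coerced column per field across all items, then a zip(*columns) transpose back into rows (objective: alternative; same return value).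


-- ===== PORT A =====
-- str(item.get(k) or d): item.get(k) is Dict.getD item k none; 'or d' collapses
-- None and "" (the only falsy Option String values on this typed domain) to d.
-- The isinstance(payload, Sequence) / isinstance(item, Mapping) guards are
-- always true on the typed domain (a list of dicts), so they vanish in the port.
def normalize_context_interaction_flow_catalog_py (payload : List (List (String × Option String))) : List (List (String × Option String)) :=
  payload.foldl (fun result item =>
    result ++ [[
      ("interaction_flow_id", some (match PySem.Dict.getD (PySem.Dict.mk item) "interaction_flow_id" none with
        | none => "" | some s => if s = "" then "" else s)),
      ("display_name", some (match PySem.Dict.getD (PySem.Dict.mk item) "display_name" none with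
        | none => "" | some s => if s = "" then "" else s)),
      ("flow_kind", some (match PySem.Dict.getD (PySem.Dict.mk item) "flow_kind" none with
        | none => "" | some s => if s = "" then "" else s)),
      ("graph_view_id", some (match PySem.Dict.getD (PySem.Dict.mk item) "graph_view_id" none with
        | none => "" | some s => if s = "" then "" else s)),
      ("query_profile_id", some (match PySem.Dict.getD (PySem.Dict.mk item) "query_profile_id" none with
        | none => "" | some s => if s = "" then "" else s)),
      ("overlay_id", match PySem.Dict.getD (PySem.Dict.mk item) "overlay_id" none with
        | none => none | some s => some s),
      ("metadata_facet_id", match PySem.Dict.getD (PySem.Dict.mk item) "metadata_facet_id" none with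
        | none => none | some s => some s),
      ("pathway_explanation_mode_id", match PySem.Dict.getD (PySem.Dict.mk item) "pathway_explanation_mode_id" none with
        | none => none | some s => some s),
      ("availability", some (match PySem.Dict.getD (PySem.Dict.mk item) "availability" none with
        | none => "unavailable" | some s => if s = "" then "unavailable" else s)),
      ("default_target_id", match PySem.Dict.getD (PySem.Dict.mk item) "default_target_id" none with
        | none => none | some s => some s),
      ("caption", some (match PySem.Dict.getD (PySem.Dict.mk item) "caption" none with
        | none => "" | some s => if s = "" then "" else s))]]) []

-- ===== PORT B =====
-- _FLOW_FIELD_SPECS: (key, default); default none = nullable field.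
def pvFlowFieldSpecs : List (String × Option String) :=
  [("interaction_flow_id", some ""),
   ("display_name", some ""),
   ("flow_kind", some ""),
   ("graph_view_id", some ""),
   ("query_profile_id", some ""),
   ("overlay_id", none),
   ("metadata_facet_id", none),
   ("pathway_explanation_mode_id", none),
   ("availability", some "unavailable"),
   ("default_target_id", none),
   ("caption", some "")]

-- zip(*cols): take the heads of all columns as a row, recurse on the tails;
-- stop as soon as some column is exhausted (Python's shortest-iterable rule).
def pvHeads {α : Type} : List (List α) → Option (List α × List (List α))
  | [] => some ([], [])
  | [] :: _ => none
  | (x :: xs) :: rest =>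
    match pvHeads rest with
    | none => none
    | some (hs, ts) => some (x :: hs, xs :: ts)

-- termination measure for pvZipStar: popping one head off every column shrinks the total size by the number of columns
theorem pvHeads_sum {α : Type} (cols : List (List α)) : ∀ (hs : List α) (ts : List (List α)), pvHeads cols = some (hs, ts) → (ts.map List.length).sum + cols.length = (cols.map List.length).sum := by
  induction cols with
  | nil => intro hs ts h; simp [pvHeads] at h; simp [h.2]
  | cons c rest ih =>
    intro hs ts h
    match c with
    | [] => simp [pvHeads] at h
    | x :: xs =>
      simp only [pvHeads] at h
      cases hrest : pvHeads rest with
      | none => rw [hrest] at h; simp at h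
      | some p =>
        obtain ⟨hs', ts'⟩ := p
        rw [hrest] at h
        simp only [Option.some.injEq, Prod.mk.injEq] at h
        obtain ⟨h1, h2⟩ := h
        subst h1; subst h2
        have := ih hs' ts' hrest
        simp only [List.map_cons, List.sum_cons, List.length_cons]
        omega

def pvZipStar {α : Type} (cols : List (List α)) : List (List α) :=
  if hne : cols = [] then [] else
    match h : pvHeads cols with
    | none => []
    | some (hs, ts) => hs :: pvZipStar ts
termination_by (cols.map List.length).sum
decreasing_by
  have hsum := pvHeads_sum cols hs ts h
  have : cols.length ≠ 0 := fun hl => hne (List.length_eq_zero_iff.mp hl)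
  omega

def normalize_context_interaction_flow_catalog_py_alt (payload : List (List (String × Option String))) : List (List (String × Option String)) :=
  let items := payload
  let columns := pvFlowFieldSpecs.map (fun kd =>
    match kd.2 with
    | none => items.map (fun item =>
        match PySem.Dict.getD (PySem.Dict.mk item) kd.1 none with
        | none => none | some s => some s)
    | some d => items.map (fun item =>
        some (match PySem.Dict.getD (PySem.Dict.mk item) kd.1 none with
        | none => d | some s => if s = "" then d else s)))
  let keys := pvFlowFieldSpecs.map Prod.fst
  (pvZipStar columns).map (fun row => keys.zip row)

-- ===== PRECONDITION & SPEC =====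
def Spec_normalize_context_interaction_flow_catalog_py (payload : List (List (String × Option String))) (out : List (List (String × Option String))) : Prop := out = normalize_context_interaction_flow_catalog_py_alt payload
instance (payload : List (List (String × Option String))) (out : List (List (String × Option String))) : Decidable (Spec_normalize_context_interaction_flow_catalog_py payload out) := by unfold Spec_normalize_context_interaction_flow_catalog_py; infer_instance

-- ===== CLAIM (what is proved, stated in full; the proofs are below) =====
def Claim_equal_normalize_context_interaction_flow_catalog_py : Prop := ∀ (payload : List (List (String × Option String))), Dom_normalize_context_interaction_flow_catalog_py payload → Spec_normalize_context_interaction_flow_catalog_py payload (normalize_context_interaction_flow_catalog_py payload)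

-- ===== LEMMAS AND PROOFS =====
-- the per-field coercion shared by both reductions
def pvG (item : List (String × Option String)) (kd : String × Option String) : Option String :=
  match kd.2 with
  | none => (match PySem.Dict.getD (PySem.Dict.mk item) kd.1 none with
      | none => none | some s => some s)
  | some d => some (match PySem.Dict.getD (PySem.Dict.mk item) kd.1 none with
      | none => d | some s => if s = "" then d else s)

theorem pvHeads_map_cons {α β : Type} (l : List β) (f : β → α) (t : β → List α) :
    pvHeads (l.map (fun kd => f kd :: t kd)) = some (l.map f, l.map t) := by
  induction l with
  | nil => rfl
  | cons a l ih => simp [pvHeads, ih]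

-- transposing the column-major table gives the row-major table (for a nonempty spec list)
theorem pvZipStar_map_map {α β γ : Type} (specs : List β) (hne : specs ≠ []) (g : β → γ → α) :
    ∀ items : List γ, pvZipStar (specs.map (fun kd => items.map (g kd))) =
      items.map (fun it => specs.map (fun kd => g kd it)) := by
  intro items
  induction items with
  | nil =>
    obtain ⟨s, rest, rfl⟩ := List.exists_cons_of_ne_nil hne
    rw [pvZipStar]
    simp [pvHeads]
  | cons x xs ih =>
    have hcols : (specs.map (fun kd => (x :: xs).map (g kd))) =
        specs.map (fun kd => g kd x :: xs.map (g kd)) := by simp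
    have hnil : specs.map (fun kd => g kd x :: xs.map (g kd)) ≠ [] := by
      simp [List.map_eq_nil_iff, hne]
    rw [hcols, pvZipStar, dif_neg hnil]
    split
    · next heq => rw [pvHeads_map_cons] at heq; exact absurd heq (by simp)
    · next hs ts heq =>
        rw [pvHeads_map_cons] at heq
        simp only [Option.some.injEq, Prod.mk.injEq] at heq
        rw [← heq.1, ← heq.2, ih]
        simp

-- B's row equals A's literal row, for every item
theorem pv_row_eq (item : List (String × Option String)) :
    (pvFlowFieldSpecs.map Prod.fst).zip (pvFlowFieldSpecs.map (fun kd => pvG item kd)) =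
      [("interaction_flow_id", some (match PySem.Dict.getD (PySem.Dict.mk item) "interaction_flow_id" none with
        | none => "" | some s => if s = "" then "" else s)),
      ("display_name", some (match PySem.Dict.getD (PySem.Dict.mk item) "display_name" none with
        | none => "" | some s => if s = "" then "" else s)),
      ("flow_kind", some (match PySem.Dict.getD (PySem.Dict.mk item) "flow_kind" none with
        | none => "" | some s => if s = "" then "" else s)),
      ("graph_view_id", some (match PySem.Dict.getD (PySem.Dict.mk item) "graph_view_id" none with
        | none => "" | some s => if s = "" then "" else s)),
      ("query_profile_id", some (match PySem.Dict.getD (PySem.Dict.mk item) "query_profile_id" none with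
        | none => "" | some s => if s = "" then "" else s)),
      ("overlay_id", match PySem.Dict.getD (PySem.Dict.mk item) "overlay_id" none with
        | none => none | some s => some s),
      ("metadata_facet_id", match PySem.Dict.getD (PySem.Dict.mk item) "metadata_facet_id" none with
        | none => none | some s => some s),
      ("pathway_explanation_mode_id", match PySem.Dict.getD (PySem.Dict.mk item) "pathway_explanation_mode_id" none with
        | none => none | some s => some s),
      ("availability", some (match PySem.Dict.getD (PySem.Dict.mk item) "availability" none with
        | none => "unavailable" | some s => if s = "" then "unavailable" else s)),
      ("default_target_id", match PySem.Dict.getD (PySem.Dict.mk item) "default_target_id" none with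
        | none => none | some s => some s),
      ("caption", some (match PySem.Dict.getD (PySem.Dict.mk item) "caption" none with
        | none => "" | some s => if s = "" then "" else s))] := rfl

-- ===== VERDICT (by name: the statement is the Claim_ definition above) =====
theorem normalize_context_interaction_flow_catalog_py_spec : Claim_equal_normalize_context_interaction_flow_catalog_py := by
  intro payload _
  unfold Spec_normalize_context_interaction_flow_catalog_py
  unfold normalize_context_interaction_flow_catalog_py normalize_context_interaction_flow_catalog_py_alt
  rw [PySem.List.foldl_append_singleton_eq_map]
  have hcol : pvFlowFieldSpecs.map (fun kd =>
      match kd.2 with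
      | none => payload.map (fun item =>
          match PySem.Dict.getD (PySem.Dict.mk item) kd.1 none with
          | none => none | some s => some s)
      | some d => payload.map (fun item =>
          some (match PySem.Dict.getD (PySem.Dict.mk item) kd.1 none with
          | none => d | some s => if s = "" then d else s))) =
      pvFlowFieldSpecs.map (fun kd => payload.map (fun item => pvG item kd)) := by
    apply List.map_congr_left
    intro kd _
    cases h2 : kd.2 <;> simp [pvG, h2]
  simp only [hcol]
  rw [pvZipStar_map_map pvFlowFieldSpecs (by decide) (fun kd it => pvG it kd) payload]
  rw [List.map_map]
  exact List.map_congr_left (fun item _ => by rw [Function.comp_apply, ← pv_row_eq item])
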